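-- pv_equiv track=rewrite | github.com/xiaohai12/leetcode | Arrary/Minimum Size Subarray Sum-209.py | find
-- ===== SOURCE A (Python) =====
-- def find(Sum, i, s):
--     low = 0
--     high = i
--     while low <= high:
--         mid = int((low + high) / 2)
--         if s > Sum[i] - Sum[mid]:
--             high = mid - 1
--         else:
--             low = mid + 1
--     return low
-- ===== SOURCE B (Python) =====
-- def find(Sum, i, s):
--     # Divide-and-conquer on list slices: recurse on the remaining segment of the
--     # prefix-sum list (carrying its base offset) instead of iterating low/high bounds.
--     if i < 0:
--         return 0
--     def go(seg, base):
--         if not seg: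
--             return base
--         k = (len(seg) - 1) // 2
--         if s > Sum[i] - seg[k]:
--             return go(seg[:k], base)
--         return go(seg[k + 1:], base + k + 1)
--     return go(Sum[:i + 1], 0)
-- ===== Notes on version B (the rewrite author's own statement) =====
-- stated objective: alternative
-- what changed: Replaces the iterative (low, high) index-bounds binary search with a recursive divide-and-conquer over list slices: it slices the prefix list Sum[:i+1], probes the middle element of the current segment, and recurses on seg[:k] or seg[k+1:] carrying a base offset.
import Mathlib
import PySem

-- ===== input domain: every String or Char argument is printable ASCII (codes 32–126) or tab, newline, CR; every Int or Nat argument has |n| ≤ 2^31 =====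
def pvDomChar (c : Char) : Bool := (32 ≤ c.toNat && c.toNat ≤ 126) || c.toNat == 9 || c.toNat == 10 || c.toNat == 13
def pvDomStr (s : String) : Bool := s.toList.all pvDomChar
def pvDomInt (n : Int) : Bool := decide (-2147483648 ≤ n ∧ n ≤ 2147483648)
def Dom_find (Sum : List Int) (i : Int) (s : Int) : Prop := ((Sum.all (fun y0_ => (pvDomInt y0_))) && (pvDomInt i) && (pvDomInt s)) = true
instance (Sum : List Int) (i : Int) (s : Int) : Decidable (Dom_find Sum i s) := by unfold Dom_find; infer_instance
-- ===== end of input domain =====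

-- B replaces the iterative (low, high) index-bounds binary search with a recursive
-- divide-and-conquer over list slices carrying a base offset; same return value.

-- ===== PORT A =====
-- A's while loop; int((low+high)/2) is float halving then truncation, which for the
-- reachable states (0 ≤ low ≤ high, |values| ≤ 2^31) equals Python's floor division.
def findLoop (Sum : List Int) (i : Int) (s : Int) (low high : Int) : Int :=
  if low ≤ high then
    let mid := PySem.Int.floordiv (low + high) 2
    if s > (PySem.List.pyGet? Sum i).getD 0 - (PySem.List.pyGet? Sum mid).getD 0 then
      findLoop Sum i s low (mid - 1)
    else
      findLoop Sum i s (mid + 1) high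
  else low
termination_by (high + 1 - low).toNat
decreasing_by
  · have h := PySem.Int.floordiv_two_mid_bounds (by assumption : low ≤ high)
    omega
  · have h := PySem.Int.floordiv_two_mid_bounds (by assumption : low ≤ high)
    omega

def find (Sum : List Int) (i : Int) (s : Int) : Int :=
  findLoop Sum i s 0 i

-- ===== PORT B =====
-- used by the port's termination proof
theorem pv_len_pos_of_not_isEmpty {α : Type} (xs : List α) (h : ¬ xs.isEmpty = true) :
    1 ≤ xs.length := by
  cases xs with
  | nil => simp at h
  | cons a t => simp

-- B's recursive helper: seg is the remaining slice of Sum, base its offset in Sum.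
def findAltGo (Sum : List Int) (i : Int) (s : Int) (seg : List Int) (base : Int) : Int :=
  if seg.isEmpty then base
  else
    let k := PySem.Int.floordiv ((seg.length : Int) - 1) 2
    if s > (PySem.List.pyGet? Sum i).getD 0 - (PySem.List.pyGet? seg k).getD 0 then
      findAltGo Sum i s (PySem.List.slice seg none (some k)) base
    else
      findAltGo Sum i s (PySem.List.slice seg (some (k + 1)) none) (base + k + 1)
termination_by seg.length
decreasing_by
  · rename_i hemp hcmp
    have hlen := pv_len_pos_of_not_isEmpty seg hemp
    rw [PySem.List.slice_to seg
      (by rw [PySem.Int.floordiv_eq_ediv_of_pos (by omega : (0:Int) < 2)]; omega)]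
    rw [PySem.Int.floordiv_eq_ediv_of_pos (by omega : (0:Int) < 2)]
    simp only [List.length_take]
    omega
  · rename_i hemp hcmp
    have hlen := pv_len_pos_of_not_isEmpty seg hemp
    rw [PySem.List.slice_from seg
      (by rw [PySem.Int.floordiv_eq_ediv_of_pos (by omega : (0:Int) < 2)]; omega)]
    rw [PySem.Int.floordiv_eq_ediv_of_pos (by omega : (0:Int) < 2)]
    simp only [List.length_drop]
    omega

def find_alt (Sum : List Int) (i : Int) (s : Int) : Int :=
  if i < 0 then 0
  else findAltGo Sum i s (PySem.List.slice Sum none (some (i + 1))) 0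

-- ===== PRECONDITION & SPEC =====
-- Pre_ excludes exactly the inputs where Python's A raises IndexError: the loop runs
-- iff 0 ≤ i, and then Sum[i] is read, so A returns normally iff i < len(Sum).
def Pre_find (Sum : List Int) (i : Int) (s : Int) : Prop := i < (Sum.length : Int)
instance (Sum : List Int) (i : Int) (s : Int) : Decidable (Pre_find Sum i s) := by
  unfold Pre_find; infer_instance

def pvWitness_find : List Int × Int × Int := ([0, 1, 3], 2, 2)

def Spec_find (Sum : List Int) (i : Int) (s : Int) (out : Int) : Prop := out = find_alt Sum i s
instance (Sum : List Int) (i : Int) (s : Int) (out : Int) : Decidable (Spec_find Sum i s out) := by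
  unfold Spec_find; infer_instance

-- ===== CLAIM (what is proved, stated in full; the proofs are below) =====
def Claim_equal_find : Prop := ∀ (Sum : List Int) (i : Int) (s : Int), Dom_find Sum i s → Pre_find Sum i s → Spec_find Sum i s (find Sum i s)

-- ===== LEMMAS AND PROOFS =====

-- Invariant: B's segment is exactly Sum[low : high+1]; the two recursions coincide.
theorem loop_eq (Sum : List Int) (i : Int) (s : Int) :
    ∀ (fuel : Nat) (low high : Int), (high + 1 - low).toNat ≤ fuel → 0 ≤ low →
      high < (Sum.length : Int) →
      findLoop Sum i s low high
        = findAltGo Sum i s ((Sum.drop low.toNat).take (high + 1 - low).toNat) low := by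
  intro fuel
  induction fuel with
  | zero =>
    intro low high hf hlo hhi
    have hle : ¬ low ≤ high := by omega
    have hL : (high + 1 - low).toNat = 0 := by omega
    rw [findLoop, findAltGo]
    simp [hle, hL]
  | succ fuel ih =>
    intro low high hf hlo hhi
    by_cases hle : low ≤ high
    · have hL1 : 1 ≤ (high + 1 - low).toNat := by omega
      have hseglen : ((Sum.drop low.toNat).take (high + 1 - low).toNat).length
          = (high + 1 - low).toNat := by
        simp only [List.length_take, List.length_drop]
        omega
      have hne : ((Sum.drop low.toNat).take (high + 1 - low).toNat).isEmpty = false := by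
        cases hcase : (Sum.drop low.toNat).take (high + 1 - low).toNat with
        | nil => rw [hcase] at hseglen; simp at hseglen; omega
        | cons a t => rfl
      have hK0 : (0:Int) ≤ (high - low) / 2 := by omega
      have hKlt : (high - low) / 2 < high + 1 - low := by omega
      have hfdB : PySem.Int.floordiv
          ((((Sum.drop low.toNat).take (high + 1 - low).toNat).length : Int) - 1) 2
          = (high - low) / 2 := by
        rw [PySem.Int.floordiv_eq_ediv_of_pos (by omega : (0:Int) < 2), hseglen,
          Int.toNat_of_nonneg (by omega : (0:Int) ≤ high + 1 - low)]
        omega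
      have hfdA : PySem.Int.floordiv (low + high) 2 = low + (high - low) / 2 := by
        rw [PySem.Int.floordiv_eq_ediv_of_pos (by omega : (0:Int) < 2)]
        omega
      have hget : PySem.List.pyGet? ((Sum.drop low.toNat).take (high + 1 - low).toNat)
          ((high - low) / 2) = PySem.List.pyGet? Sum (low + (high - low) / 2) := by
        rw [PySem.List.pyGet?_of_nonneg _ hK0, PySem.List.pyGet?_of_nonneg Sum (by omega)]
        rw [List.getElem?_take_of_lt (by omega), List.getElem?_drop]
        congr 1
        omega
      rw [findLoop, findAltGo]
      simp only [if_pos hle, hne, Bool.false_eq_true, if_false, hfdA, hfdB, hget]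
      split_ifs with hc
      · rw [PySem.List.slice_to _ hK0, List.take_take,
          show min ((high - low) / 2).toNat (high + 1 - low).toNat
            = ((high - low) / 2).toNat from by omega]
        have hrec := ih low (low + (high - low) / 2 - 1) (by omega) hlo (by omega)
        rw [show (low + (high - low) / 2 - 1 + 1 - low).toNat = ((high - low) / 2).toNat
          from by omega] at hrec
        exact hrec
      · rw [PySem.List.slice_from _ (by omega : (0:Int) ≤ (high - low) / 2 + 1),
          List.drop_take, List.drop_drop]
        have hrec := ih (low + (high - low) / 2 + 1) high (by omega) (by omega) hhi
        rw [show (low + (high - low) / 2 + 1).toNat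
            = low.toNat + ((high - low) / 2 + 1).toNat from by omega,
          show (high + 1 - (low + (high - low) / 2 + 1)).toNat
            = (high + 1 - low).toNat - ((high - low) / 2 + 1).toNat from by omega] at hrec
        exact hrec
    · have hL : (high + 1 - low).toNat = 0 := by omega
      rw [findLoop, findAltGo]
      simp [hle, hL]

-- ===== VERDICT (by name: the statement is the Claim_ definition above) =====
theorem find_spec : Claim_equal_find := by
  intro Sum i s _hd hp
  unfold Spec_find find find_alt
  by_cases hi : i < 0
  · rw [findLoop]
    simp [hi, show ¬ (0 : Int) ≤ i by omega]
  · rw [if_neg hi, PySem.List.slice_to Sum (by omega : (0:Int) ≤ i + 1)]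
    have := loop_eq Sum i s (i + 1).toNat 0 i (by omega) (by omega) hp
    simpa using this
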